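-- pv_equiv track=rewrite | github.com/DashFin-FarDb/financial-asset-relationship-db | conftest.py | _strip_pytest_cov_args
-- ===== SOURCE A (Python) =====
-- from collections.abc import Callable, Generator, Iterator, MutableSequence
--
-- _COV_FLAGS_WITH_OPTIONAL_VALUE = {"--cov", "--cov-report"}
--
-- _COV_VALUE_FLAGS = {"--cov-config", "--cov-context", "--cov-fail-under"}
--
-- _COV_BOOLEAN_FLAGS = {
--     "--cov-append",
--     "--cov-branch",
--     "--cov-reset",
-- }
--
-- def _strip_pytest_cov_args(args: MutableSequence[str]) -> list[str]:
--     """Return args with pytest-cov flags removed without dropping test paths."""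
--     filtered_args: list[str] = []
--     index = 0
--
--     while index < len(args):
--         arg = args[index]
--
--         if arg == "--":
--             filtered_args.extend(args[index:])
--             break
--
--         if arg in _COV_FLAGS_WITH_OPTIONAL_VALUE:
--             index += 1
--             if index < len(args) and _looks_like_option_value(args[index]):
--                 index += 1
--             continue
--
--         if arg in _COV_VALUE_FLAGS:
--             index += 1
--             if index < len(args) and args[index] != "--":
--                 index += 1
--             continue
--
--         if arg in _COV_BOOLEAN_FLAGS:
--             index += 1
--             continue
--
--         if _is_cov_equals_arg(arg):
--             index += 1
--             continue
--
--         filtered_args.append(arg)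
--         index += 1
--
--     return filtered_args
--
-- def _looks_like_option_value(arg: str) -> bool:
--     """Return whether arg is a value token rather than another CLI option."""
--     return arg != "--" and not arg.startswith("-")
--
-- def _is_cov_equals_arg(arg: str) -> bool:
--     """Return whether arg is a pytest-cov flag provided as --flag=value."""
--     cov_prefixes = (
--         "--cov=",
--         "--cov-report=",
--         "--cov-config=",
--         "--cov-context=",
--         "--cov-fail-under=",
--     )
--     return arg.startswith(cov_prefixes)
-- ===== SOURCE B (Python) =====
-- _COV_FLAGS_WITH_OPTIONAL_VALUE = {"--cov", "--cov-report"}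
-- _COV_VALUE_FLAGS = {"--cov-config", "--cov-context", "--cov-fail-under"}
-- _COV_BOOLEAN_FLAGS = {"--cov-append", "--cov-branch", "--cov-reset"}
-- _COV_EQ_PREFIXES = ("--cov=", "--cov-report=", "--cov-config=",
--                     "--cov-context=", "--cov-fail-under=")
--
-- _NORMAL, _SKIP_OPTIONAL_VALUE, _SKIP_VALUE, _PASSTHROUGH = 0, 1, 2, 3
--
--
-- def _strip_pytest_cov_args(args):
--     """Return args with pytest-cov flags removed without dropping test paths."""
--     out = []
--     mode = _NORMAL
--     for arg in args:
--         if mode == _PASSTHROUGH: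
--             out.append(arg)
--             continue
--         if mode == _SKIP_OPTIONAL_VALUE:
--             mode = _NORMAL
--             if arg != "--" and not arg.startswith("-"):
--                 continue  # consume the value token
--             # otherwise fall through and classify arg normally
--         elif mode == _SKIP_VALUE:
--             mode = _NORMAL
--             if arg != "--":
--                 continue  # consume the value token
--             # "--" falls through and is classified normally
--         # NORMAL classification
--         if arg == "--":
--             mode = _PASSTHROUGH
--             out.append(arg)
--         elif arg in _COV_FLAGS_WITH_OPTIONAL_VALUE:
--             mode = _SKIP_OPTIONAL_VALUE
--         elif arg in _COV_VALUE_FLAGS: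
--             mode = _SKIP_VALUE
--         elif arg in _COV_BOOLEAN_FLAGS or arg.startswith(_COV_EQ_PREFIXES):
--             pass  # dropped
--         else:
--             out.append(arg)
--     return out
-- ===== Notes on version B (the rewrite author's own statement) =====
-- stated objective: alternative
-- what changed: Replaced A's index-with-lookahead while-loop (peeking at args[index+1] and slicing args[index:]) by a single forward for-loop over the tokens maintaining a mode variable (NORMAL / SKIP_OPTIONAL_VALUE / SKIP_VALUE / PASSTHROUGH), with skipped-value decisions made when the next token arrives and fall-through reclassification for option-looking tokens.
import Mathlib
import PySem

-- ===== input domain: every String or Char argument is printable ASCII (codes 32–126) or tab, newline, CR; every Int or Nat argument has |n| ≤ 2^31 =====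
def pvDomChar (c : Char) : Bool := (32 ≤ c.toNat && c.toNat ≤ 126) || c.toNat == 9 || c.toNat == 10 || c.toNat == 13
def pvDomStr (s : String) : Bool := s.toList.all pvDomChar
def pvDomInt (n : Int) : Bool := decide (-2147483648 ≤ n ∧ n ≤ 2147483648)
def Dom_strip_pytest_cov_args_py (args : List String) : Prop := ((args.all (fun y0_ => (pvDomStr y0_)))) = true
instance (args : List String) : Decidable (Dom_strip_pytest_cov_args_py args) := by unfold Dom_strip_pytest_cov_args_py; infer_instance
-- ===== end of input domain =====

-- B replaces A's index-with-lookahead while-loop by a single forward pass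
-- maintaining a mode (NORMAL / SKIP_OPTIONAL_VALUE / SKIP_VALUE / PASSTHROUGH); same cost, different decomposition.

-- ===== PORT A =====
def pvLooksLikeOptionValue (arg : String) : Bool :=
  arg != "--" && !(PySem.Str.startswith arg "-")

def pvIsCovEqualsArg (arg : String) : Bool :=
  PySem.Str.startswith arg "--cov=" || PySem.Str.startswith arg "--cov-report=" ||
  PySem.Str.startswith arg "--cov-config=" || PySem.Str.startswith arg "--cov-context=" ||
  PySem.Str.startswith arg "--cov-fail-under="

def pvOptFlag (a : String) : Bool := a == "--cov" || a == "--cov-report"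
def pvValFlag (a : String) : Bool := a == "--cov-config" || a == "--cov-context" || a == "--cov-fail-under"
def pvBoolFlag (a : String) : Bool := a == "--cov-append" || a == "--cov-branch" || a == "--cov-reset"

-- transliteration of A's while-loop as recursion on the suffix args[index:]
def strip_pytest_cov_args_py (args : List String) : List String :=
  match args with
  | [] => []
  | arg :: rest =>
    if arg == "--" then arg :: rest
    else if pvOptFlag arg then
      match rest with
      | [] => []
      | v :: rest' =>
        if pvLooksLikeOptionValue v then strip_pytest_cov_args_py rest'
        else strip_pytest_cov_args_py (v :: rest')
    else if pvValFlag arg then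
      match rest with
      | [] => []
      | v :: rest' =>
        if v != "--" then strip_pytest_cov_args_py rest'
        else strip_pytest_cov_args_py (v :: rest')
    else if pvBoolFlag arg then strip_pytest_cov_args_py rest
    else if pvIsCovEqualsArg arg then strip_pytest_cov_args_py rest
    else arg :: strip_pytest_cov_args_py rest
termination_by args.length
decreasing_by all_goals simp

-- ===== PORT B =====
-- modes: 0 = NORMAL, 1 = SKIP_OPTIONAL_VALUE, 2 = SKIP_VALUE, 3 = PASSTHROUGH
def pvNormalStep (arg : String) (out : List String) : Nat × List String :=
  if arg == "--" then (3, out ++ [arg])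
  else if pvOptFlag arg then (1, out)
  else if pvValFlag arg then (2, out)
  else if pvBoolFlag arg || pvIsCovEqualsArg arg then (0, out)
  else (0, out ++ [arg])

def pvStepB (st : Nat × List String) (arg : String) : Nat × List String :=
  if st.1 == 3 then (3, st.2 ++ [arg])
  else if st.1 == 1 then
    (if arg != "--" && !(PySem.Str.startswith arg "-") then (0, st.2) else pvNormalStep arg st.2)
  else if st.1 == 2 then
    (if arg != "--" then (0, st.2) else pvNormalStep arg st.2)
  else pvNormalStep arg st.2

def strip_pytest_cov_args_py_alt (args : List String) : List String :=
  (args.foldl pvStepB (0, [])).2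

-- ===== PRECONDITION & SPEC =====
def Spec_strip_pytest_cov_args_py (args : List String) (out : List String) : Prop := out = strip_pytest_cov_args_py_alt args
instance (args : List String) (out : List String) : Decidable (Spec_strip_pytest_cov_args_py args out) := by unfold Spec_strip_pytest_cov_args_py; infer_instance

-- ===== CLAIM (what is proved, stated in full; the proofs are below) =====
def Claim_equal_strip_pytest_cov_args_py : Prop := ∀ (args : List String), Dom_strip_pytest_cov_args_py args → Spec_strip_pytest_cov_args_py args (strip_pytest_cov_args_py args)

-- ===== LEMMAS AND PROOFS =====

-- what the fold computes when started in SKIP_OPTIONAL_VALUE / SKIP_VALUE mode,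
-- phrased in terms of A's port
def pvOptCont (args : List String) : List String :=
  match args with
  | [] => []
  | v :: rest' =>
    if pvLooksLikeOptionValue v then strip_pytest_cov_args_py rest'
    else strip_pytest_cov_args_py (v :: rest')

def pvValCont (args : List String) : List String :=
  match args with
  | [] => []
  | v :: rest' =>
    if v != "--" then strip_pytest_cov_args_py rest'
    else strip_pytest_cov_args_py (v :: rest')

lemma strip_eq_dashdash (arg : String) (rest : List String) (h1 : (arg == "--") = true) :
    strip_pytest_cov_args_py (arg :: rest) = arg :: rest := by
  rw [strip_pytest_cov_args_py.eq_def]; simp [h1]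

lemma strip_eq_opt (arg : String) (rest : List String) (h1 : ¬(arg == "--") = true)
    (h2 : pvOptFlag arg = true) :
    strip_pytest_cov_args_py (arg :: rest) = pvOptCont rest := by
  rw [strip_pytest_cov_args_py.eq_def]
  cases rest with
  | nil => simp [h1, h2, pvOptCont]
  | cons v r => simp [h1, h2, pvOptCont]

lemma strip_eq_val (arg : String) (rest : List String) (h1 : ¬(arg == "--") = true)
    (h2 : ¬pvOptFlag arg = true) (h3 : pvValFlag arg = true) :
    strip_pytest_cov_args_py (arg :: rest) = pvValCont rest := by
  rw [strip_pytest_cov_args_py.eq_def]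
  cases rest with
  | nil => simp [h1, h2, h3, pvValCont]
  | cons v r =>
    simp only [pvValCont]
    by_cases hv : v = "--"
    · simp [h1, h2, h3, hv]
    · simp [h1, h2, h3, hv]

lemma strip_eq_drop (arg : String) (rest : List String) (h1 : ¬(arg == "--") = true)
    (h2 : ¬pvOptFlag arg = true) (h3 : ¬pvValFlag arg = true)
    (h4 : (pvBoolFlag arg || pvIsCovEqualsArg arg) = true) :
    strip_pytest_cov_args_py (arg :: rest) = strip_pytest_cov_args_py rest := by
  rw [strip_pytest_cov_args_py.eq_def]
  rcases Bool.or_eq_true_iff.mp h4 with h | h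
  · simp [h1, h2, h3, h]
  · by_cases hb : pvBoolFlag arg = true
    · simp [h1, h2, h3, hb]
    · simp [h1, h2, h3, hb, h]

lemma strip_eq_keep (arg : String) (rest : List String) (h1 : ¬(arg == "--") = true)
    (h2 : ¬pvOptFlag arg = true) (h3 : ¬pvValFlag arg = true)
    (h4 : ¬(pvBoolFlag arg || pvIsCovEqualsArg arg) = true) :
    strip_pytest_cov_args_py (arg :: rest) = arg :: strip_pytest_cov_args_py rest := by
  rw [strip_pytest_cov_args_py.eq_def]
  simp only [Bool.or_eq_true_iff, not_or] at h4
  simp [h1, h2, h3, h4.1, h4.2]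

theorem pv_key (args : List String) : ∀ (out : List String),
    (args.foldl pvStepB (3, out)).2 = out ++ args ∧
    (args.foldl pvStepB (0, out)).2 = out ++ strip_pytest_cov_args_py args ∧
    (args.foldl pvStepB (1, out)).2 = out ++ pvOptCont args ∧
    (args.foldl pvStepB (2, out)).2 = out ++ pvValCont args := by
  induction args with
  | nil => intro out; simp [strip_pytest_cov_args_py, pvOptCont, pvValCont]
  | cons arg rest ih =>
    intro out
    have normal : (rest.foldl pvStepB (pvNormalStep arg out)).2
        = out ++ strip_pytest_cov_args_py (arg :: rest) := by
      unfold pvNormalStep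
      by_cases h1 : (arg == "--") = true
      · rw [strip_eq_dashdash arg rest h1]
        simp only [h1, if_true]
        simpa [List.append_assoc] using (ih (out ++ [arg])).1
      · by_cases h2 : pvOptFlag arg = true
        · rw [strip_eq_opt arg rest h1 h2]
          simp only [h1, h2, Bool.false_eq_true, if_false, if_true]
          exact (ih out).2.2.1
        · by_cases h3 : pvValFlag arg = true
          · rw [strip_eq_val arg rest h1 h2 h3]
            simp only [h1, h2, h3, Bool.false_eq_true, if_false, if_true]
            exact (ih out).2.2.2
          · by_cases h4 : (pvBoolFlag arg || pvIsCovEqualsArg arg) = true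
            · rw [strip_eq_drop arg rest h1 h2 h3 h4]
              simp only [h1, h2, h3, h4, Bool.false_eq_true, if_false, if_true]
              exact (ih out).2.1
            · rw [strip_eq_keep arg rest h1 h2 h3 h4]
              simp only [h1, h2, h3, h4, Bool.false_eq_true, if_false]
              simpa [List.append_assoc] using (ih (out ++ [arg])).2.1
    refine ⟨?_, ?_, ?_, ?_⟩
    · show (rest.foldl pvStepB (pvStepB (3, out) arg)).2 = _
      simp only [pvStepB]
      norm_num
      simpa [List.append_assoc] using (ih (out ++ [arg])).1
    · show (rest.foldl pvStepB (pvStepB (0, out) arg)).2 = _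
      simp only [pvStepB]
      norm_num
      exact normal
    · show (rest.foldl pvStepB (pvStepB (1, out) arg)).2 = _
      simp only [pvStepB]
      norm_num
      by_cases hv : (arg != "--" && !(PySem.Str.startswith arg "-")) = true
      · simp only [hv, if_true, pvOptCont, pvLooksLikeOptionValue]
        rw [if_pos (show ¬arg = "--" ∧ PySem.Chars.startswith arg.toList "-".toList = false from by simpa using hv)]
        exact (ih out).2.1
      · simp only [hv, Bool.false_eq_true, if_false, pvOptCont, pvLooksLikeOptionValue]
        rw [if_neg (show ¬(¬arg = "--" ∧ PySem.Chars.startswith arg.toList "-".toList = false) from by simpa using hv)]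
        exact normal
    · show (rest.foldl pvStepB (pvStepB (2, out) arg)).2 = _
      simp only [pvStepB]
      norm_num
      by_cases hv : (arg != "--") = true
      · simp only [hv, if_true, pvValCont]
        have hne : ¬(arg = "--") := by simpa using hv
        simp only [hne, if_false]
        exact (ih out).2.1
      · simp only [hv, Bool.false_eq_true, if_false, pvValCont]
        have heq : arg = "--" := by simpa using hv
        simp only [heq, if_true]
        simpa [heq] using normal

-- ===== VERDICT (by name: the statement is the Claim_ definition above) =====
theorem strip_pytest_cov_args_py_spec : Claim_equal_strip_pytest_cov_args_py := by
  intro args _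
  unfold Spec_strip_pytest_cov_args_py strip_pytest_cov_args_py_alt
  have := (pv_key args []).2.1
  simp only [this, List.nil_append]
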